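-- pv_equiv track=rewrite | github.com/kimeunh3/codingtest-study1 | seoyoung/프로그래머스/최소직사각형/최소직사각형.py | solution
-- ===== SOURCE A (Python) =====
-- def solution(sizes):
--     width, height = 0, 0
--     for size in sizes:
--         w, h = max(size), min(size)
--         if width < w:
--             width = w
--         if height < h:
--             height = h
--
--     return width*height
-- ===== SOURCE B (Python) =====
-- def solution(sizes):
--     def dims(rest):
--         if not rest:
--             return (0, 0)
--         srt = sorted(rest[0])
--         w, h = dims(rest[1:])
--         return (max(w, srt[-1]), max(h, srt[0]))
--
--     w, h = dims(sizes)
--     return w * h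
-- ===== Notes on version B (the rewrite author's own statement) =====
-- stated objective: alternative
-- what changed: Replaces the interleaved forward accumulation loop with a back-to-front recursion that sorts each row and reads its extremes off the sorted row's endpoints instead of calling max/min.
import Mathlib
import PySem

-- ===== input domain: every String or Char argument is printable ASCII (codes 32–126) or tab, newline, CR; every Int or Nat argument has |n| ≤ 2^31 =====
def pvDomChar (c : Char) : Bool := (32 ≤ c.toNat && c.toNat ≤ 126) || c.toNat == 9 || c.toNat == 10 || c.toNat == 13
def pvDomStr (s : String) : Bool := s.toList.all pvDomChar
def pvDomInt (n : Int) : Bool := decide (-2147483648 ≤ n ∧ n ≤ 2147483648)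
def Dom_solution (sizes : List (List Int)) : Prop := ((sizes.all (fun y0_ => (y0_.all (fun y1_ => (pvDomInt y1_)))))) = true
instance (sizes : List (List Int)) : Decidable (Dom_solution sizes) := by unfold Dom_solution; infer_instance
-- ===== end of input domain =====

-- B replaces A's interleaved forward accumulation loop by a back-to-front recursion that sorts
-- each row and reads its extremes off the sorted row's endpoints; same return value.
-- ===== PORT A =====
-- one interleaved loop keeping (width, height); max(size)/min(size) via PySem.List.max?/min? (none only on an empty row, excluded by Pre_)
def solution (sizes : List (List Int)) : Int :=
  let wh := sizes.foldl (fun (p : Int × Int) size =>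
    let w := (PySem.List.max? size (fun x => x)).getD 0
    let h := (PySem.List.min? size (fun x => x)).getD 0
    let width := if p.1 < w then w else p.1
    let height := if p.2 < h then h else p.2
    (width, height)) (0, 0)
  wh.1 * wh.2

-- ===== PORT B =====
-- dims(rest): recursion on the list; each row is sorted and its extremes are srt[-1] and srt[0]
-- (srt[-1]/srt[0] via pyGet?, none only on an empty row, excluded by Pre_)
def dimsB (rest : List (List Int)) : Int × Int :=
  match rest with
  | [] => (0, 0)
  | s :: t =>
    let srt := PySem.List.sorted s (fun x => x) false
    let wh := dimsB t
    (max wh.1 ((PySem.List.pyGet? srt (-1)).getD 0),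
     max wh.2 ((PySem.List.pyGet? srt 0).getD 0))

def solution_alt (sizes : List (List Int)) : Int :=
  let wh := dimsB sizes
  wh.1 * wh.2

-- ===== PRECONDITION & SPEC =====
-- Pre_ excludes only inputs on which both Pythons raise ValueError/IndexError: a row that is an empty list.
def Pre_solution (sizes : List (List Int)) : Prop := ∀ s ∈ sizes, s ≠ []
instance (sizes : List (List Int)) : Decidable (Pre_solution sizes) := by unfold Pre_solution; infer_instance
def pvWitness_solution : List (List Int) := [[60, 50], [30, 70], [60, 30], [80, 40]]

def Spec_solution (sizes : List (List Int)) (out : Int) : Prop := out = solution_alt sizes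
instance (sizes : List (List Int)) (out : Int) : Decidable (Spec_solution sizes out) := by unfold Spec_solution; infer_instance

-- ===== CLAIM (what is proved, stated in full; the proofs are below) =====
def Claim_equal_solution : Prop := ∀ (sizes : List (List Int)), Dom_solution sizes → Pre_solution sizes → Spec_solution sizes (solution sizes)

-- ===== LEMMAS AND PROOFS =====

-- the last element of a sorted list is its maximum
theorem sorted_last_eq_max (s : List Int) :
    ((PySem.List.pyGet? (PySem.List.sorted s (fun x => x) false) (-1)).getD 0)
      = (PySem.List.max? s (fun x => x)).getD 0 := by
  rcases hs : PySem.List.max? s (fun x => x) with _ | m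
  · rw [PySem.List.max?_eq_none_iff] at hs; subst hs; rfl
  · have hmem := PySem.List.max?_mem hs
    have hmax := PySem.List.max?_isMax hs
    set l := PySem.List.sorted s (fun x => x) false with hl
    have hlne : l ≠ [] := by
      intro h
      rw [hl, PySem.List.sorted_eq_nil_iff] at h
      subst h; simp at hmem
    rw [PySem.List.pyGet?_neg_one, List.getLast?_eq_some_getLast hlne]
    have hlast_mem : l.getLast hlne ∈ s := by
      rw [← PySem.List.mem_sorted (key := fun x => x) (rev := false) (xs := s)]
      exact List.getLast_mem hlne
    have h1 : l.getLast hlne ≤ m := hmax _ hlast_mem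
    have h2 : m ≤ l.getLast hlne := by
      have hm_l : m ∈ l := by
        rw [hl, PySem.List.mem_sorted]; exact hmem
      obtain ⟨p, hp, hpe⟩ := List.mem_iff_getElem.mp hm_l
      have hlastE : l.getLast hlne = l[l.length - 1] := List.getLast_eq_getElem hlne
      have := PySem.List.key_sorted_getElem_mono (xs := s) (key := fun x => x)
        (p := p) (q := l.length - 1) (by omega) (by rw [← hl]; omega)
      simp only [← hl] at this
      rw [hpe] at this
      rw [hlastE]; exact this
    simp [le_antisymm h1 h2]

-- the head of a sorted list is its minimum
theorem sorted_head_eq_min (s : List Int) :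
    ((PySem.List.pyGet? (PySem.List.sorted s (fun x => x) false) 0).getD 0)
      = (PySem.List.min? s (fun x => x)).getD 0 := by
  rcases hs : PySem.List.min? s (fun x => x) with _ | m
  · rw [PySem.List.min?_eq_none_iff] at hs; subst hs; rfl
  · have hmem := PySem.List.min?_mem hs
    have hmin := PySem.List.min?_isMin hs
    rcases hc : PySem.List.sorted s (fun x => x) false with _ | ⟨a, t⟩
    · rw [PySem.List.sorted_eq_nil_iff] at hc; subst hc; simp at hmem
    · have ha_mem : a ∈ s := by
        rw [← PySem.List.mem_sorted (key := fun x => x) (rev := false) (xs := s), hc]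
        simp
      have h1 : m ≤ a := hmin _ ha_mem
      have h2 : a ≤ m := by simpa using PySem.List.key_head_sorted_le s (fun x => x) hc m hmem
      rw [PySem.List.pyGet?_zero_cons]
      simp [le_antisymm h2 h1]

-- pushing an extra max through A's running-max fold
theorem foldl_max_out (f : List Int → Int) (t : List (List Int)) (a b : Int) :
    t.foldl (fun acc s => max acc (f s)) (max a b)
      = max (t.foldl (fun acc s => max acc (f s)) a) b := by
  induction t generalizing a with
  | nil => rfl
  | cons x r ih =>
      simp only [List.foldl_cons]
      rw [show max (max a b) (f x) = max (max a (f x)) b by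
        rw [max_assoc, max_comm b, ← max_assoc], ih]

-- A's paired fold splits into two independent running-max folds
theorem pair_fold_split (sizes : List (List Int)) (a b : Int)
    (f g : List Int → Int) :
    sizes.foldl (fun (p : Int × Int) size =>
      (if p.1 < f size then f size else p.1, if p.2 < g size then g size else p.2)) (a, b)
    = (sizes.foldl (fun acc size => max acc (f size)) a,
       sizes.foldl (fun acc size => max acc (g size)) b) := by
  induction sizes generalizing a b with
  | nil => rfl
  | cons x t ih =>
      simp only [List.foldl_cons]
      rw [ih]
      congr 1 <;> congr 1 <;> omega

-- B's back-to-front recursion computes the same two running maxima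
theorem dimsB_eq_folds (sizes : List (List Int)) :
    dimsB sizes
      = (sizes.foldl (fun acc s => max acc ((PySem.List.max? s (fun x => x)).getD 0)) 0,
         sizes.foldl (fun acc s => max acc ((PySem.List.min? s (fun x => x)).getD 0)) 0) := by
  induction sizes with
  | nil => rfl
  | cons x t ih =>
      simp only [dimsB, ih, List.foldl_cons, sorted_last_eq_max, sorted_head_eq_min]
      rw [foldl_max_out (fun s => (PySem.List.max? s (fun x => x)).getD 0) t 0,
          foldl_max_out (fun s => (PySem.List.min? s (fun x => x)).getD 0) t 0]

-- ===== VERDICT (by name: the statement is the Claim_ definition above) =====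
theorem solution_spec : Claim_equal_solution := by
  intro sizes _ _
  unfold Spec_solution solution solution_alt
  rw [pair_fold_split
    (f := fun s => (PySem.List.max? s (fun x => x)).getD 0)
    (g := fun s => (PySem.List.min? s (fun x => x)).getD 0),
    dimsB_eq_folds]
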